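-- pv_equiv track=rewrite | github.com/ayoubzulfiqar/Leetcode-Medium | BinarySearchableNumbersinanUnsortedArray/binary_searchable_numbers_in_an_unsorted_array.py | count_binary_searchable_numbers
-- ===== SOURCE A (Python) =====
-- def count_binary_searchable_numbers(arr: list[int]) -> int:
--     n = len(arr)
--     if n == 0:
--         return 0
--
--     left_max = [0] * n
--     left_max[0] = arr[0]
--     for i in range(1, n):
--         left_max[i] = max(left_max[i-1], arr[i])
--
--     right_min = [0] * n
--     right_min[n-1] = arr[n-1]
--     for i in range(n - 2, -1, -1):
--         right_min[i] = min(right_min[i+1], arr[i])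
--
--     count = 0
--     for i in range(n):
--         is_left_ok = (i == 0) or (left_max[i-1] <= arr[i])
--         is_right_ok = (i == n - 1) or (arr[i] <= right_min[i+1])
--
--         if is_left_ok and is_right_ok:
--             count += 1
--
--     return count
-- ===== SOURCE B (Python) =====
-- def count_binary_searchable_numbers(arr: list[int]) -> int:
--     # Direct specification check: an element counts iff no element to its left
--     # exceeds it and no element to its right is below it.
--     count = 0
--     for i, x in enumerate(arr):
--         if all(l <= x for l in arr[:i]) and all(x <= r for r in arr[i+1:]):
--             count += 1
--     return count
-- ===== Notes on version B (the rewrite author's own statement) =====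
-- stated objective: simpler
-- what changed: Replaced A's three-stage dynamic-programming scheme (precomputed prefix-max array, precomputed suffix-min array, then a counting loop over the arrays) by a direct check of the definition: for each element, scan its whole left slice and right slice with all(); no auxiliary arrays or running extrema at all.
import Mathlib
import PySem

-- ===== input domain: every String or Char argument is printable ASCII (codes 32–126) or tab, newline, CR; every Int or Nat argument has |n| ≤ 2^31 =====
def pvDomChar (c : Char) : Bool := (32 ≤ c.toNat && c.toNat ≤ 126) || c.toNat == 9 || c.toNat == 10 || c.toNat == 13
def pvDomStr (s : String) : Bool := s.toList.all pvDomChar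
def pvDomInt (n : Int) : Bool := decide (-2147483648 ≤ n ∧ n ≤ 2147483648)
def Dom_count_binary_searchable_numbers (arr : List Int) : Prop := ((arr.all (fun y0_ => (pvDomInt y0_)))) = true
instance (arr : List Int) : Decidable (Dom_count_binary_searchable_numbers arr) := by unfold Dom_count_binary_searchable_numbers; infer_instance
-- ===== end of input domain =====

-- B drops A's precomputed prefix-max/suffix-min arrays and checks the definition
-- directly, scanning each element's left and right slices (objective: simpler).

-- ===== PORT A =====
-- literal transliteration of A; all list indices are provably in range, so arr[i] is
-- ported as pyGetD with default 0 (exact on every admitted input)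
def count_binary_searchable_numbers (arr : List Int) : Int :=
  let n : Int := (arr.length : Int)
  if n == 0 then 0
  else
    let lm0 : List Int := (List.replicate arr.length (0 : Int)).set 0 (PySem.List.pyGetD arr 0 0)
    let left_max : List Int := (PySem.List.pyRange 1 n 1).foldl
      (fun lm i => lm.set i.toNat (max (PySem.List.pyGetD lm (i - 1) 0) (PySem.List.pyGetD arr i 0))) lm0
    let rm0 : List Int := (List.replicate arr.length (0 : Int)).set (arr.length - 1) (PySem.List.pyGetD arr (n - 1) 0)
    let right_min : List Int := (PySem.List.pyRange (n - 2) (-1) (-1)).foldl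
      (fun rm i => rm.set i.toNat (min (PySem.List.pyGetD rm (i + 1) 0) (PySem.List.pyGetD arr i 0))) rm0
    (PySem.List.pyRange 0 n 1).foldl
      (fun count i =>
        let is_left_ok : Bool := (i == 0) || decide (PySem.List.pyGetD left_max (i - 1) 0 ≤ PySem.List.pyGetD arr i 0)
        let is_right_ok : Bool := (i == n - 1) || decide (PySem.List.pyGetD arr i 0 ≤ PySem.List.pyGetD right_min (i + 1) 0)
        if is_left_ok && is_right_ok then count + 1 else count) 0

-- ===== PORT B =====
-- transliteration of Source B: for i, x in enumerate(arr), test arr[:i] and arr[i+1:]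
def count_binary_searchable_numbers_alt (arr : List Int) : Int :=
  (PySem.List.enumerate arr 0).foldl
    (fun count p =>
      if (PySem.List.slice arr none (some p.1)).all (fun l => decide (l ≤ p.2)) &&
         (PySem.List.slice arr (some (p.1 + 1)) none).all (fun r => decide (p.2 ≤ r))
      then count + 1 else count) 0

-- ===== PRECONDITION & SPEC =====
def Spec_count_binary_searchable_numbers (arr : List Int) (out : Int) : Prop := out = count_binary_searchable_numbers_alt arr
instance (arr : List Int) (out : Int) : Decidable (Spec_count_binary_searchable_numbers arr out) := by unfold Spec_count_binary_searchable_numbers; infer_instance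

-- ===== CLAIM (what is proved, stated in full; the proofs are below) =====
def Claim_equal_count_binary_searchable_numbers : Prop := ∀ (arr : List Int), Dom_count_binary_searchable_numbers arr → Spec_count_binary_searchable_numbers arr (count_binary_searchable_numbers arr)

-- ===== LEMMAS AND PROOFS =====

def pvPmAux (m : Int) : List Int → List Int
  | [] => []
  | x :: xs => (max m x) :: pvPmAux (max m x) xs

def pvMnAux (m : Int) : List Int → List Int
  | [] => []
  | x :: xs => (min m x) :: pvMnAux (min m x) xs

def pvPm : List Int → List Int
  | [] => []
  | a :: as => a :: pvPmAux a as

def pvMn : List Int → List Int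
  | [] => []
  | a :: as => a :: pvMnAux a as

def pvSm (arr : List Int) : List Int := (pvMn arr.reverse).reverse

theorem length_pvPmAux (m : Int) (xs : List Int) : (pvPmAux m xs).length = xs.length := by
  induction xs generalizing m with
  | nil => rfl
  | cons x xs ih => simp [pvPmAux, ih]

theorem length_pvMnAux (m : Int) (xs : List Int) : (pvMnAux m xs).length = xs.length := by
  induction xs generalizing m with
  | nil => rfl
  | cons x xs ih => simp [pvMnAux, ih]

theorem length_pvPm (arr : List Int) : (pvPm arr).length = arr.length := by
  cases arr with
  | nil => rfl
  | cons a as => simp [pvPm, length_pvPmAux]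

theorem length_pvMn (arr : List Int) : (pvMn arr).length = arr.length := by
  cases arr with
  | nil => rfl
  | cons a as => simp [pvMn, length_pvMnAux]

theorem length_pvSm (arr : List Int) : (pvSm arr).length = arr.length := by
  simp [pvSm, length_pvMn]

theorem pvPm_cons_eq_aux (a : Int) (as : List Int) : pvPm (a :: as) = pvPmAux a (a :: as) := by
  simp [pvPm, pvPmAux]

theorem pvMn_cons_eq_aux (a : Int) (as : List Int) : pvMn (a :: as) = pvMnAux a (a :: as) := by
  simp [pvMn, pvMnAux]

theorem pvPmAux_getD_succ (xs : List Int) : ∀ (m : Int) (i : Nat), i + 1 < xs.length →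
    (pvPmAux m xs).getD (i+1) 0 = max ((pvPmAux m xs).getD i 0) (xs.getD (i+1) 0) := by
  induction xs with
  | nil => intro m i h; simp at h
  | cons x xs ih =>
    intro m i h
    cases i with
    | zero =>
      cases xs with
      | nil => simp at h
      | cons y ys => simp [pvPmAux]
    | succ j =>
      have := ih (max m x) j (by simpa using h)
      simpa [pvPmAux] using this

theorem pvMnAux_getD_succ (xs : List Int) : ∀ (m : Int) (i : Nat), i + 1 < xs.length →
    (pvMnAux m xs).getD (i+1) 0 = min ((pvMnAux m xs).getD i 0) (xs.getD (i+1) 0) := by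
  induction xs with
  | nil => intro m i h; simp at h
  | cons x xs ih =>
    intro m i h
    cases i with
    | zero =>
      cases xs with
      | nil => simp at h
      | cons y ys => simp [pvMnAux]
    | succ j =>
      have := ih (min m x) j (by simpa using h)
      simpa [pvMnAux] using this

theorem pvMn_getD_zero (a : Int) (as : List Int) : (pvMn (a :: as)).getD 0 0 = a := rfl

theorem pvPm_getD_succ (arr : List Int) (i : Nat) (h : i + 1 < arr.length) :
    (pvPm arr).getD (i+1) 0 = max ((pvPm arr).getD i 0) (arr.getD (i+1) 0) := by
  cases arr with
  | nil => simp at h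
  | cons a as =>
    rw [pvPm_cons_eq_aux]
    exact pvPmAux_getD_succ (a :: as) a i h

theorem pvMn_getD_succ (arr : List Int) (i : Nat) (h : i + 1 < arr.length) :
    (pvMn arr).getD (i+1) 0 = min ((pvMn arr).getD i 0) (arr.getD (i+1) 0) := by
  cases arr with
  | nil => simp at h
  | cons a as =>
    rw [pvMn_cons_eq_aux]
    exact pvMnAux_getD_succ (a :: as) a i h

-- named copies of A's three fold steps
def pvLmStep (arr : List Int) (lm : List Int) (i : Int) : List Int :=
  lm.set i.toNat (max (PySem.List.pyGetD lm (i - 1) 0) (PySem.List.pyGetD arr i 0))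

def pvRmStep (arr : List Int) (rm : List Int) (i : Int) : List Int :=
  rm.set i.toNat (min (PySem.List.pyGetD rm (i + 1) 0) (PySem.List.pyGetD arr i 0))

def pvCntStep (arr lm rm : List Int) (n : Int) (count : Int) (i : Int) : Int :=
  let is_left_ok : Bool := (i == 0) || decide (PySem.List.pyGetD lm (i - 1) 0 ≤ PySem.List.pyGetD arr i 0)
  let is_right_ok : Bool := (i == n - 1) || decide (PySem.List.pyGetD arr i 0 ≤ PySem.List.pyGetD rm (i + 1) 0)
  if is_left_ok && is_right_ok then count + 1 else count

theorem pvTakeGetD (l : List Int) (m k : Nat) (h : k < m) : (l.take m).getD k 0 = l.getD k 0 := by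
  simp [List.getD_eq_getElem?_getD, h]

-- left_max fold invariant
theorem pvLm_inv (a : Int) (as : List Int) (k : Nat) (hk : k ≤ as.length) :
    (PySem.List.pyRange 1 (1 + (k : Int)) 1).foldl (pvLmStep (a :: as))
      ((List.replicate (a :: as).length (0 : Int)).set 0 (PySem.List.pyGetD (a :: as) 0 0))
    = (pvPm (a :: as)).take (k + 1) ++ List.replicate (as.length - k) 0 := by
  induction k with
  | zero =>
    rw [PySem.List.pyRange_one_eq_nil (by omega)]
    simp [pvPm, List.replicate_succ, PySem.List.pyGetD]
  | succ k ih =>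
    have hk' : k ≤ as.length := by omega
    have hcast : (1 + ((k + 1 : Nat) : Int)) = (1 + (k : Int)) + 1 := by push_cast; ring
    rw [hcast, PySem.List.pyRange_one_succ_right (by omega), List.foldl_append, ih hk']
    have hlen_pm : (pvPm (a :: as)).length = as.length + 1 := by
      simpa using length_pvPm (a :: as)
    have htk : ((pvPm (a :: as)).take (k + 1)).length = k + 1 := by
      simp [hlen_pm]; omega
    simp only [List.foldl_cons, List.foldl_nil, pvLmStep]
    have h1 : ((1 : Int) + k) - 1 = (k : Int) := by ring
    have h2 : ((1 : Int) + k) = ((k + 1 : Nat) : Int) := by push_cast; ring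
    rw [h1, h2, PySem.List.pyGetD_natCast, PySem.List.pyGetD_natCast]
    have hget : ((pvPm (a :: as)).take (k + 1) ++ List.replicate (as.length - k) 0).getD k 0
        = (pvPm (a :: as)).getD k 0 := by
      rw [List.getD_append _ _ _ _ (by omega), pvTakeGetD _ _ _ (by omega)]
    rw [hget]
    have hmax : max ((pvPm (a :: as)).getD k 0) ((a :: as).getD (k + 1) 0)
        = (pvPm (a :: as)).getD (k + 1) 0 := by
      rw [pvPm_getD_succ (a :: as) k (by simp; omega)]
    rw [hmax]
    have htoNat : ((k + 1 : Nat) : Int).toNat = k + 1 := by omega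
    rw [htoNat, List.set_append]
    rw [if_neg (by omega)]
    have hsub : k + 1 - ((pvPm (a :: as)).take (k + 1)).length = 0 := by omega
    rw [hsub]
    have hrep : as.length - k = (as.length - (k + 1)) + 1 := by omega
    rw [hrep, List.replicate_succ, List.set_cons_zero]
    have htake : (pvPm (a :: as)).take (k + 1 + 1)
        = (pvPm (a :: as)).take (k + 1) ++ [(pvPm (a :: as)).getD (k + 1) 0] := by
      rw [List.take_add_one]
      congr 1
      rw [List.getElem?_eq_getElem (by omega), List.getD_eq_getElem _ _ (by omega)]
      rfl
    rw [htake, List.append_assoc]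
    rfl

theorem pvRevGetD (l : List Int) (j : Nat) (h : j < l.length) :
    l.reverse.getD j 0 = l.getD (l.length - 1 - j) 0 := by
  rw [List.getD_eq_getElem _ _ (by simpa using h), List.getD_eq_getElem _ _ (by omega)]
  exact List.getElem_reverse _

theorem pvSm_getD_last (a : Int) (as : List Int) :
    (pvSm (a :: as)).getD as.length 0 = (a :: as).getD as.length 0 := by
  unfold pvSm
  have hlen : (pvMn (a :: as).reverse).length = as.length + 1 := by
    simp [length_pvMn]
  rw [pvRevGetD _ _ (by omega), hlen]
  have h0 : as.length + 1 - 1 - as.length = 0 := by omega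
  rw [h0]
  cases hr : (a :: as).reverse with
  | nil => exact absurd (congrArg List.length hr) (by simp)
  | cons b bs =>
    rw [pvMn_getD_zero]
    have : (a :: as).reverse.getD 0 0 = b := by rw [hr]; rfl
    rw [← this, pvRevGetD _ _ (by simp)]
    simp

theorem pvSm_getD_step (a : Int) (as : List Int) (i : Nat) (hi : i + 1 < (a :: as).length) :
    (pvSm (a :: as)).getD i 0
      = min ((pvSm (a :: as)).getD (i + 1) 0) ((a :: as).getD i 0) := by
  unfold pvSm
  have hlen : (pvMn (a :: as).reverse).length = as.length + 1 := by simp [length_pvMn]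
  simp only [List.length_cons] at hi
  rw [pvRevGetD _ _ (by omega), pvRevGetD _ _ (by omega), hlen]
  have e1 : as.length + 1 - 1 - i = (as.length - 1 - i) + 1 := by omega
  rw [e1, pvMn_getD_succ _ _ (by simp; omega)]
  have e2 : as.length + 1 - 1 - (i + 1) = as.length - 1 - i := by omega
  rw [e2]
  congr 1
  have : (a :: as).reverse.getD (as.length - 1 - i + 1) 0
      = (a :: as).getD ((a :: as).length - 1 - (as.length - 1 - i + 1)) 0 :=
    pvRevGetD _ _ (by simp; omega)
  rw [this]
  congr 1
  simp; omega

theorem pvDropCons (l : List Int) (k : Nat) (h : k < l.length) :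
    l.getD k 0 :: l.drop (k + 1) = l.drop k := by
  rw [List.getD_eq_getElem _ _ h]
  exact (List.drop_eq_getElem_cons h).symm

-- right_min fold invariant
theorem pvRm_inv (a : Int) (as : List Int) (k : Nat) (hk : k ≤ as.length) :
    (PySem.List.pyRange ((k : Int) - 1) (-1) (-1)).foldl (pvRmStep (a :: as))
      (List.replicate k 0 ++ (pvSm (a :: as)).drop k)
    = pvSm (a :: as) := by
  induction k with
  | zero =>
    rw [PySem.List.pyRange_neg_one_eq_nil (by omega)]
    simp
  | succ k ih =>
    have hk' : k ≤ as.length := by omega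
    have hSmLen : (pvSm (a :: as)).length = as.length + 1 := by
      simpa using length_pvSm (a :: as)
    have hc : ((k + 1 : Nat) : Int) - 1 = (k : Int) := by push_cast; ring
    rw [hc, PySem.List.pyRange_neg_one_cons (by omega), List.foldl_cons]
    have hstep : pvRmStep (a :: as) (List.replicate (k + 1) 0 ++ (pvSm (a :: as)).drop (k + 1)) (k : Int)
        = List.replicate k 0 ++ (pvSm (a :: as)).drop k := by
      unfold pvRmStep
      have h1 : ((k : Int) + 1) = ((k + 1 : Nat) : Int) := by push_cast; ring
      rw [h1, PySem.List.pyGetD_natCast, PySem.List.pyGetD_natCast]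
      have hget : (List.replicate (k + 1) (0:Int) ++ (pvSm (a :: as)).drop (k + 1)).getD (k + 1) 0
          = (pvSm (a :: as)).getD (k + 1) 0 := by
        rw [List.getD_append_right _ _ _ _ (by simp)]
        simp
      rw [hget]
      have hmin : min ((pvSm (a :: as)).getD (k + 1) 0) ((a :: as).getD k 0)
          = (pvSm (a :: as)).getD k 0 := (pvSm_getD_step a as k (by simp; omega)).symm
      rw [hmin]
      have htoNat : ((k : Nat) : Int).toNat = k := by omega
      rw [htoNat, List.set_append, if_pos (by simp)]
      have hrepl : (List.replicate (k + 1) (0:Int)).set k ((pvSm (a :: as)).getD k 0)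
          = List.replicate k 0 ++ [(pvSm (a :: as)).getD k 0] := by
        rw [List.replicate_succ', List.set_append, if_neg (by simp), List.length_replicate,
          Nat.sub_self, List.set_cons_zero]
      rw [hrepl, List.append_assoc]
      congr 1
      exact pvDropCons _ _ (by rw [hSmLen]; omega)
    rw [hstep]
    exact ih hk'

def pvCntPred (arr lm rm : List Int) (n : Int) (i : Int) : Bool :=
  ((i == 0) || decide (PySem.List.pyGetD lm (i - 1) 0 ≤ PySem.List.pyGetD arr i 0)) &&
  ((i == n - 1) || decide (PySem.List.pyGetD arr i 0 ≤ PySem.List.pyGetD rm (i + 1) 0))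

theorem pvFoldlCount {α : Type} (P : α → Bool) (l : List α) : ∀ c : Int,
    l.foldl (fun c i => if P i then c + 1 else c) c
    = c + (l.map (fun i => if P i then (1 : Int) else 0)).sum := by
  induction l with
  | nil => intro c; simp
  | cons x l ih =>
    intro c
    by_cases h : P x <;> simp [h, ih, add_assoc]

theorem pvLeftBool (p a : Int) : decide (p ≤ a) = (a == max p a) := by
  by_cases h : p ≤ a <;> simp [h, max_def] <;> omega

theorem pvRightBool (s a : Int) : decide (a ≤ s) = (a == min s a) := by
  by_cases h : a ≤ s <;> simp [h, min_def] <;> omega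

-- the loop indicator equals the clean per-index indicator
theorem pvPred_eq (a : Int) (as : List Int) (k : Nat) (hk : k < as.length + 1) :
    pvCntPred (a :: as) (pvPm (a :: as)) (pvSm (a :: as)) (((a :: as).length : Nat) : Int) (k : Int)
    = (((a :: as).getD k 0 == (pvPm (a :: as)).getD k 0) &&
       ((a :: as).getD k 0 == (pvSm (a :: as)).getD k 0)) := by
  unfold pvCntPred
  congr 1
  · cases k with
    | zero => simp [pvPm]
    | succ j =>
      have h0 : (((j + 1 : Nat) : Int) == 0) = false := by simp; omega
      have h1 : ((j + 1 : Nat) : Int) - 1 = ((j : Nat) : Int) := by push_cast; ring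
      rw [h0, h1, PySem.List.pyGetD_natCast, PySem.List.pyGetD_natCast,
        pvPm_getD_succ (a :: as) j (by simp; omega), Bool.false_or]
      exact pvLeftBool _ _
  · by_cases hke : k = as.length
    · subst hke
      have h0 : ((as.length : Int) == ((a :: as).length : Int) - 1) = true := by simp
      have h1 : ((a :: as).getD as.length 0 == (pvSm (a :: as)).getD as.length 0) = true := by
        rw [pvSm_getD_last]; simp
      rw [h0, h1, Bool.true_or]
    · have h0 : (((k : Nat) : Int) == ((a :: as).length : Int) - 1) = false := by
        simp; omega
      have h1 : ((k : Nat) : Int) + 1 = ((k + 1 : Nat) : Int) := by push_cast; ring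
      rw [h0, h1, PySem.List.pyGetD_natCast, PySem.List.pyGetD_natCast, Bool.false_or,
        pvSm_getD_step a as k (by simp; omega)]
      exact pvRightBool _ _

-- A in closed form (nonempty input)
theorem pvA_closed (a : Int) (as : List Int) :
    count_binary_searchable_numbers (a :: as)
    = ((List.range (as.length + 1)).map (fun k =>
        if ((a :: as).getD k 0 == (pvPm (a :: as)).getD k 0) &&
           ((a :: as).getD k 0 == (pvSm (a :: as)).getD k 0) then (1 : Int) else 0)).sum := by
  show (if ((((a :: as).length : Nat) : Int) == 0) then (0 : Int) else
      (PySem.List.pyRange 0 (((a :: as).length : Nat) : Int) 1).foldl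
        (pvCntStep (a :: as)
          ((PySem.List.pyRange 1 (((a :: as).length : Nat) : Int) 1).foldl (pvLmStep (a :: as))
            ((List.replicate (a :: as).length (0 : Int)).set 0 (PySem.List.pyGetD (a :: as) 0 0)))
          ((PySem.List.pyRange ((((a :: as).length : Nat) : Int) - 2) (-1) (-1)).foldl (pvRmStep (a :: as))
            ((List.replicate (a :: as).length (0 : Int)).set ((a :: as).length - 1)
              (PySem.List.pyGetD (a :: as) ((((a :: as).length : Nat) : Int) - 1) 0)))
          (((a :: as).length : Nat) : Int)) 0) = _
  rw [if_neg (by simp; omega)]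
  have hSmLen : (pvSm (a :: as)).length = as.length + 1 := by
    simpa using length_pvSm (a :: as)
  have hend : (1 : Int) + ((as.length : Nat) : Int) = (((a :: as).length : Nat) : Int) := by
    simp; ring
  have hLM : (PySem.List.pyRange 1 (((a :: as).length : Nat) : Int) 1).foldl (pvLmStep (a :: as))
      ((List.replicate (a :: as).length (0 : Int)).set 0 (PySem.List.pyGetD (a :: as) 0 0))
      = pvPm (a :: as) := by
    rw [← hend, pvLm_inv a as as.length (le_refl _)]
    have : (pvPm (a :: as)).take (as.length + 1) = pvPm (a :: as) := by
      apply List.take_of_length_le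
      simp [length_pvPm]
    simp [this]
  have hstart : (((a :: as).length : Nat) : Int) - 2 = ((as.length : Nat) : Int) - 1 := by
    simp; ring
  have hinit : (List.replicate (a :: as).length (0 : Int)).set ((a :: as).length - 1)
        (PySem.List.pyGetD (a :: as) ((((a :: as).length : Nat) : Int) - 1) 0)
      = List.replicate as.length 0 ++ (pvSm (a :: as)).drop as.length := by
    have h1 : (((a :: as).length : Nat) : Int) - 1 = ((as.length : Nat) : Int) := by simp
    rw [h1, PySem.List.pyGetD_natCast]
    have h2 : (a :: as).length - 1 = as.length := by simp
    rw [h2]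
    have h3 : (a :: as).length = as.length + 1 := by simp
    rw [h3, List.replicate_succ', List.set_append, if_neg (by simp), List.length_replicate,
      Nat.sub_self, List.set_cons_zero]
    congr 1
    have h4 : (pvSm (a :: as)).drop (as.length + 1) = [] := by
      apply List.drop_eq_nil_of_le
      simp [hSmLen]
    rw [← pvDropCons _ _ (by omega), h4, pvSm_getD_last]
  have hRM : (PySem.List.pyRange ((((a :: as).length : Nat) : Int) - 2) (-1) (-1)).foldl (pvRmStep (a :: as))
      ((List.replicate (a :: as).length (0 : Int)).set ((a :: as).length - 1)
        (PySem.List.pyGetD (a :: as) ((((a :: as).length : Nat) : Int) - 1) 0))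
      = pvSm (a :: as) := by
    rw [hinit, hstart]
    exact pvRm_inv a as as.length (le_refl _)
  rw [hLM, hRM]
  have hfun : pvCntStep (a :: as) (pvPm (a :: as)) (pvSm (a :: as)) (((a :: as).length : Nat) : Int)
      = fun c i => if pvCntPred (a :: as) (pvPm (a :: as)) (pvSm (a :: as)) (((a :: as).length : Nat) : Int) i then c + 1 else c := rfl
  rw [hfun, PySem.List.pyRange_zero_natCast, List.foldl_map, pvFoldlCount, zero_add]
  congr 1
  apply List.map_congr_left
  intro k hkmem
  have hk : k < as.length + 1 := by simpa using List.mem_range.mp hkmem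
  rw [pvPred_eq a as k hk]

-- named copy of B's fold step
def pvBStep (arr : List Int) (count : Int) (p : Int × Int) : Int :=
  if (PySem.List.slice arr none (some p.1)).all (fun l => decide (l ≤ p.2)) &&
     (PySem.List.slice arr (some (p.1 + 1)) none).all (fun r => decide (p.2 ≤ r))
  then count + 1 else count

-- B in closed form: per-index brute-force indicator over the index range
theorem pvAlt_closed (arr : List Int) :
    count_binary_searchable_numbers_alt arr
    = ((List.range arr.length).map (fun k =>
        if (arr.take k).all (fun l => decide (l ≤ arr.getD k 0)) &&
           (arr.drop (k + 1)).all (fun r => decide (arr.getD k 0 ≤ r))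
        then (1 : Int) else 0)).sum := by
  show (PySem.List.enumerate arr 0).foldl (pvBStep arr) 0 = _
  rw [PySem.List.enumerate_eq_map_pyRange (d := 0), PySem.List.len_eq,
    PySem.List.pyRange_zero_natCast, List.map_map, List.foldl_map]
  have hstep : (fun (c : Int) (k : Nat) =>
        pvBStep arr c (((fun j => (j, PySem.List.pyGetD arr j 0)) ∘ fun k : Nat => (k : Int)) k))
      = fun (c : Int) (k : Nat) =>
          if (arr.take k).all (fun l => decide (l ≤ arr.getD k 0)) &&
             (arr.drop (k + 1)).all (fun r => decide (arr.getD k 0 ≤ r))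
          then c + 1 else c := by
    funext c k
    show pvBStep arr c ((k : Int), PySem.List.pyGetD arr (k : Int) 0) = _
    unfold pvBStep
    rw [PySem.List.pyGetD_natCast, PySem.List.slice_to_natCast]
    have h1 : ((k : Int) + 1) = ((k + 1 : Nat) : Int) := by push_cast; ring
    rw [h1, PySem.List.slice_from_natCast]
  rw [hstep, pvFoldlCount (fun k : Nat =>
      (arr.take k).all (fun l => decide (l ≤ arr.getD k 0)) &&
      (arr.drop (k + 1)).all (fun r => decide (arr.getD k 0 ≤ r))), zero_add]

theorem pvTakeSuccGetD (l : List Int) (k : Nat) (h : k < l.length) :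
    l.take (k + 1) = l.take k ++ [l.getD k 0] := by
  rw [List.take_add_one]
  congr 1
  rw [List.getElem?_eq_getElem h, List.getD_eq_getElem _ _ h]
  rfl

-- the prefix-max entry bounds exactly the prefix
theorem pvPm_le_iff (a : Int) (as : List Int) (k : Nat) (hk : k < as.length + 1) (x : Int) :
    (pvPm (a :: as)).getD k 0 ≤ x ↔ ∀ y ∈ (a :: as).take (k + 1), y ≤ x := by
  induction k with
  | zero => simp [pvPm]
  | succ j ih =>
    have hj : j < as.length + 1 := by omega
    rw [pvPm_getD_succ (a :: as) j (by simp; omega),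
      pvTakeSuccGetD (a :: as) (j + 1) (by simp; omega)]
    simp only [max_le_iff, ih hj, List.mem_append, List.mem_singleton]
    constructor
    · rintro ⟨h1, h2⟩ y (hy | hy)
      · exact h1 y hy
      · subst hy; exact h2
    · intro h
      exact ⟨fun y hy => h y (Or.inl hy), h _ (Or.inr rfl)⟩

-- the suffix-min entry bounds exactly the suffix (downward induction on the distance)
theorem pvSm_ge_iff_aux (a : Int) (as : List Int) : ∀ (d k : Nat), as.length - k = d →
    k < as.length + 1 → ∀ x : Int,
    (x ≤ (pvSm (a :: as)).getD k 0 ↔ ∀ y ∈ (a :: as).drop k, x ≤ y) := by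
  intro d
  induction d with
  | zero =>
    intro k hd hk x
    have hk' : k = as.length := by omega
    subst hk'
    rw [pvSm_getD_last, ← pvDropCons (a :: as) as.length (by simp)]
    have hnil : (a :: as).drop (as.length + 1) = [] := by
      apply List.drop_eq_nil_of_le; simp
    rw [hnil]
    simp
  | succ d ih =>
    intro k hd hk x
    rw [pvSm_getD_step a as k (by simp; omega),
      ← pvDropCons (a :: as) k (by simp; omega)]
    simp only [le_min_iff, List.mem_cons]
    constructor
    · rintro ⟨h1, h2⟩ y (hy | hy)
      · subst hy; exact h2
      · exact ((ih (k + 1) (by omega) (by omega) x).mp h1) y hy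
    · intro h
      exact ⟨(ih (k + 1) (by omega) (by omega) x).mpr (fun y hy => h y (Or.inr hy)),
        h _ (Or.inl rfl)⟩

theorem pvMemTakeSucc (l : List Int) (k : Nat) (h : k < l.length) :
    l.getD k 0 ∈ l.take (k + 1) := by
  rw [pvTakeSuccGetD l k h]
  simp

theorem pvMemDrop (l : List Int) (k : Nat) (h : k < l.length) :
    l.getD k 0 ∈ l.drop k := by
  rw [← pvDropCons l k h]
  simp

-- per-index: A's left indicator = B's left slice-scan
theorem pvLeft_eq (a : Int) (as : List Int) (k : Nat) (hk : k < as.length + 1) :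
    ((a :: as).getD k 0 == (pvPm (a :: as)).getD k 0)
    = ((a :: as).take k).all (fun l => decide (l ≤ (a :: as).getD k 0)) := by
  have hklen : k < (a :: as).length := by simp; omega
  have hx : (a :: as).getD k 0 ≤ (pvPm (a :: as)).getD k 0 :=
    (pvPm_le_iff a as k hk _).mp (le_refl _) _ (pvMemTakeSucc _ _ hklen)
  rw [Bool.eq_iff_iff]
  simp only [beq_iff_eq, List.all_eq_true, decide_eq_true_eq]
  constructor
  · intro h y hy
    have hy' : y ∈ (a :: as).take (k + 1) := by
      rw [pvTakeSuccGetD (a :: as) k hklen]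
      exact List.mem_append_left _ hy
    exact (pvPm_le_iff a as k hk _).mp (le_of_eq h.symm) y hy'
  · intro h
    refine le_antisymm hx ((pvPm_le_iff a as k hk _).mpr ?_)
    intro y hy
    rw [pvTakeSuccGetD (a :: as) k hklen] at hy
    rcases List.mem_append.mp hy with hy | hy
    · exact h y hy
    · rw [List.mem_singleton.mp hy]

-- per-index: A's right indicator = B's right slice-scan
theorem pvRight_eq (a : Int) (as : List Int) (k : Nat) (hk : k < as.length + 1) :
    ((a :: as).getD k 0 == (pvSm (a :: as)).getD k 0)
    = ((a :: as).drop (k + 1)).all (fun r => decide ((a :: as).getD k 0 ≤ r)) := by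
  have hklen : k < (a :: as).length := by simp; omega
  have hx : (pvSm (a :: as)).getD k 0 ≤ (a :: as).getD k 0 :=
    (pvSm_ge_iff_aux a as (as.length - k) k rfl hk _).mp (le_refl _) _ (pvMemDrop _ _ hklen)
  rw [Bool.eq_iff_iff]
  simp only [beq_iff_eq, List.all_eq_true, decide_eq_true_eq]
  constructor
  · intro h y hy
    have hy' : y ∈ (a :: as).drop k := by
      rw [← pvDropCons (a :: as) k hklen]
      exact List.mem_cons_of_mem _ hy
    exact (pvSm_ge_iff_aux a as (as.length - k) k rfl hk _).mp (le_of_eq h) y hy'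
  · intro h
    refine le_antisymm ((pvSm_ge_iff_aux a as (as.length - k) k rfl hk _).mpr ?_) hx
    intro y hy
    rw [← pvDropCons (a :: as) k hklen] at hy
    rcases List.mem_cons.mp hy with hy | hy
    · rw [hy]
    · exact h y hy

-- the two programs agree
theorem pv_main (arr : List Int) :
    count_binary_searchable_numbers arr = count_binary_searchable_numbers_alt arr := by
  cases arr with
  | nil => rfl
  | cons a as =>
    rw [pvA_closed, pvAlt_closed]
    simp only [List.length_cons]
    congr 1
    apply List.map_congr_left
    intro k hkmem
    have hk : k < as.length + 1 := List.mem_range.mp hkmem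
    rw [pvLeft_eq a as k hk, pvRight_eq a as k hk]

-- ===== VERDICT (by name: the statement is the Claim_ definition above) =====
theorem count_binary_searchable_numbers_spec : Claim_equal_count_binary_searchable_numbers := by
  intro arr _
  exact pv_main arr
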